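-- pv_equiv track=rewrite | github.com/pypi-data/pypi-mirror-404 | packages/mathai/mathai-0.7.8.tar.gz/mathai-0.7.8/mathai/base.py | perfect_root
-- ===== SOURCE A (Python) =====
-- def perfect_root(n, r):
--     if r <= 0 or (n < 0 and r % 2 == 0):
--         return False, None
--
--     lo = 0
--     hi = n if n > 1 else 1
--
--     while lo <= hi:
--         mid = lo + (hi - lo) // 2
--         pow_val = 1
--
--         for _ in range(r):
--             pow_val *= mid
--             if pow_val > n:
--                 break
--
--         if pow_val == n:
--             return True, mid
--         elif pow_val < n:
--             lo = mid + 1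
--         else:
--             hi = mid - 1
--
--     return False, None
-- ===== SOURCE B (Python) =====
-- def perfect_root(n, r):
--     if r <= 0 or n < 0:
--         return False, None
--     if n <= 1:
--         return True, n
--     b = n.bit_length()
--     if r >= b:
--         # 2**r > n, so no base >= 2 can work and 0,1 are ruled out by n >= 2
--         return False, None
--     x = 2 ** ((b + r - 1) // r)          # upper bound: x**r >= 2**b > n
--     while True:                          # Newton's iteration for the integer r-th root
--         y = ((r - 1) * x + n // x ** (r - 1)) // r
--         if y >= x:
--             break
--         x = y
--     return (True, x) if x ** r == n else (False, None)
-- ===== Notes on version B (the rewrite author's own statement) =====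
-- stated objective: faster
-- what changed: Replaces A's binary search over [0, n] (with an inner capped power loop re-run at every probe) by Newton's integer r-th-root iteration started from a power-of-two upper bound derived from n.bit_length(), plus a direct r >= bit_length cutoff, then a single exactness check x**r == n.
import Mathlib
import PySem

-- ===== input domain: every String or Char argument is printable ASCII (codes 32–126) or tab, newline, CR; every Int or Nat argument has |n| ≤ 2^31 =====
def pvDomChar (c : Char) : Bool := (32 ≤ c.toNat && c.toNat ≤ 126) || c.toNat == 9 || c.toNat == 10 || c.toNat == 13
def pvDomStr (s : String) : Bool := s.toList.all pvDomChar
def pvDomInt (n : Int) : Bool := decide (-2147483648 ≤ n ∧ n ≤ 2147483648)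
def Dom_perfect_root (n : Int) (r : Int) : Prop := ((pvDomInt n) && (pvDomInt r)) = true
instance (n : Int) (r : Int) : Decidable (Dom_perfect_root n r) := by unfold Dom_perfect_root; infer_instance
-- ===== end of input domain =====

-- B replaces A's binary search over [0, n] by Newton's integer-root iteration (a different
-- algorithm; same return value on every input).

-- ===== PORT A =====
-- the inner 'for _ in range(r): pow_val *= mid; if pow_val > n: break' loop of A
def pvPowCap (n mid : Int) : Nat → Int → Int
  | 0, p => p
  | k+1, p =>
      let p' := p * mid
      if p' > n then p' else pvPowCap n mid k p'

-- the 'while lo <= hi' binary-search loop of A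
def pvSearch (n r lo hi : Int) : Bool × Option Int :=
  if h : lo ≤ hi then
    let mid := lo + PySem.Int.floordiv (hi - lo) 2
    let p := pvPowCap n mid r.toNat 1
    if p = n then (true, some mid)
    else if p < n then pvSearch n r (mid + 1) hi
    else pvSearch n r lo (mid - 1)
  else (false, none)
termination_by (hi + 1 - lo).toNat
decreasing_by
  all_goals
    have h2 : PySem.Int.floordiv (hi - lo) 2 = (hi - lo) / 2 :=
      PySem.Int.floordiv_eq_ediv_of_pos (by omega)
    omega

def perfect_root (n : Int) (r : Int) : Bool × Option Int :=
  if r ≤ 0 ∨ (n < 0 ∧ PySem.Int.mod r 2 = 0) then (false, none)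
  else pvSearch n r 0 (if n > 1 then n else 1)

-- ===== PORT B =====
-- the 'while True' Newton loop of B; the 'x ≤ 0' guard only makes the recursion total
-- (every actual call has 2 ≤ x)
def pvNewton (n r x : Int) : Int :=
  if x ≤ 0 then x
  else
    let y := PySem.Int.floordiv ((r - 1) * x + PySem.Int.floordiv n (x ^ (r - 1).toNat)) r
    if y ≥ x then x else pvNewton n r y
termination_by x.toNat
decreasing_by omega

def perfect_root_alt (n : Int) (r : Int) : Bool × Option Int :=
  if r ≤ 0 ∨ n < 0 then (false, none)
  else if n ≤ 1 then (true, some n)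
  else
    let b := PySem.Int.bitLength n
    if (b : Int) ≤ r then (false, none)
    else
      let x := pvNewton n r ((2:Int) ^ (PySem.Int.floordiv ((b : Int) + r - 1) r).toNat)
      if x ^ r.toNat = n then (true, some x) else (false, none)

-- ===== PRECONDITION & SPEC =====
def Spec_perfect_root (n : Int) (r : Int) (out : Bool × Option Int) : Prop := out = perfect_root_alt n r
instance (n : Int) (r : Int) (out : Bool × Option Int) : Decidable (Spec_perfect_root n r out) := by unfold Spec_perfect_root; infer_instance

-- ===== CLAIM (what is proved, stated in full; the proofs are below) =====
def Claim_equal_perfect_root : Prop := ∀ (n : Int) (r : Int), Dom_perfect_root n r → Spec_perfect_root n r (perfect_root n r)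

-- ===== LEMMAS AND PROOFS =====

-- ---- facts about A's capped power loop ----
theorem pvPowCap_eq (n mid : Int) (hmid : 1 ≤ mid) :
    ∀ (k : Nat) (p : Int), 0 ≤ p → p * mid ^ k ≤ n → pvPowCap n mid k p = p * mid ^ k := by
  intro k
  induction k with
  | zero => intro p hp h; simp [pvPowCap]
  | succ k ih =>
    intro p hp h
    have h1 : (1:Int) ≤ mid ^ k := one_le_pow₀ hmid
    have hle : p * mid ≤ p * mid ^ (k+1) := by
      calc p * mid = p * mid * 1 := by ring
        _ ≤ p * mid * mid ^ k := by nlinarith [mul_nonneg hp (show (0:Int) ≤ mid by omega)]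
        _ = p * mid ^ (k+1) := by ring
    have hnb : ¬ (p * mid > n) := by omega
    simp only [pvPowCap, hnb, if_false]
    rw [ih (p * mid) (mul_nonneg hp (by omega)) (by calc p * mid * mid ^ k = p * mid ^ (k+1) := by ring
        _ ≤ n := h)]
    ring

theorem pvPowCap_gt (n mid : Int) (hmid : 1 ≤ mid) :
    ∀ (k : Nat) (p : Int), 0 ≤ p → n < p * mid ^ k → n < pvPowCap n mid k p := by
  intro k
  induction k with
  | zero => intro p hp h; simpa [pvPowCap] using h
  | succ k ih =>
    intro p hp h
    by_cases hb : p * mid > n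
    · simp [pvPowCap, hb]
    · simp only [pvPowCap, hb, if_false]
      exact ih (p * mid) (mul_nonneg hp (by omega)) (by calc n < p * mid ^ (k+1) := h
        _ = p * mid * mid ^ k := by ring)

theorem pvPowCap_zero (n : Int) (hn : 0 ≤ n) (k : Nat) (hk : k ≠ 0) (p : Int) :
    pvPowCap n 0 k p = 0 := by
  obtain ⟨j, rfl⟩ : ∃ j, k = j + 1 := ⟨k - 1, by omega⟩
  clear hk
  induction j generalizing p with
  | zero =>
    simp only [pvPowCap, mul_zero]
    split <;> simp
  | succ j ih =>
    simp only [pvPowCap, mul_zero]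
    rw [if_neg (by omega)]
    exact ih 0

-- the capped power compares with n exactly as mid^k does
theorem pvPowCap_cmp (n mid : Int) (hn : 0 ≤ n) (hmid : 0 ≤ mid) (k : Nat) (hk : k ≠ 0) :
    (pvPowCap n mid k 1 = n ↔ mid ^ k = n) ∧ (pvPowCap n mid k 1 < n ↔ mid ^ k < n) := by
  rcases eq_or_lt_of_le hmid with h0 | h1
  · rw [← h0, pvPowCap_zero n hn k hk, zero_pow hk]
    exact ⟨Iff.rfl, Iff.rfl⟩
  · have h1 : 1 ≤ mid := h1
    by_cases hc : mid ^ k ≤ n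
    · rw [pvPowCap_eq n mid h1 k 1 (by omega) (by simpa using hc), one_mul]
      exact ⟨Iff.rfl, Iff.rfl⟩
    · rw [not_le] at hc
      have := pvPowCap_gt n mid h1 k 1 (by omega) (by simpa using hc)
      exact ⟨⟨fun h => by omega, fun h => by omega⟩, ⟨fun h => by omega, fun h => by omega⟩⟩

-- ---- the binary search finds the unique nonnegative root if one exists ----
theorem pvSearch_found (n r : Int) (hn : 0 ≤ n) (hr : 1 ≤ r) (s : Int) (hs : 0 ≤ s)
    (hsr : s ^ r.toNat = n) :
    ∀ (lo hi : Int), 0 ≤ lo → lo ≤ s → s ≤ hi → pvSearch n r lo hi = (true, some s) := by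
  have hk : r.toNat ≠ 0 := by omega
  suffices H : ∀ (m : Nat) (lo hi : Int), (hi + 1 - lo).toNat = m → 0 ≤ lo → lo ≤ s → s ≤ hi →
      pvSearch n r lo hi = (true, some s) by
    intro lo hi; exact H _ lo hi rfl
  intro m
  induction m using Nat.strong_induction_on with
  | _ m ih =>
    intro lo hi hm h0 h1 h2
    have hlh : lo ≤ hi := le_trans h1 h2
    rw [pvSearch.eq_def]
    simp only [dif_pos hlh]
    have hfd : PySem.Int.floordiv (hi - lo) 2 = (hi - lo) / 2 :=
      PySem.Int.floordiv_eq_ediv_of_pos (by omega)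
    set mid := lo + PySem.Int.floordiv (hi - lo) 2 with hmiddef
    have hmb : lo ≤ mid ∧ mid ≤ hi := by rw [hmiddef, hfd]; omega
    have h0m : 0 ≤ mid := by omega
    obtain ⟨ceq, clt⟩ := pvPowCap_cmp n mid hn h0m r.toNat hk
    rcases lt_trichotomy (mid ^ r.toNat) n with hlt | heq | hgt
    · rw [if_neg (by rw [ceq]; omega), if_pos (by rw [clt]; exact hlt)]
      have hms : mid < s := by
        by_contra hc
        have : s ^ r.toNat ≤ mid ^ r.toNat := pow_le_pow_left₀ hs (by omega) _
        omega
      exact ih _ (by omega) _ hi rfl (by omega) (by omega) h2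
    · rw [if_pos (by rw [ceq]; exact heq)]
      have h1' : ¬ mid < s := by
        intro hc
        have := pow_lt_pow_left₀ hc h0m hk
        omega
      have h2' : ¬ s < mid := by
        intro hc
        have := pow_lt_pow_left₀ hc hs hk
        omega
      have : mid = s := by omega
      rw [this]
    · rw [if_neg (by rw [ceq]; omega), if_neg (by rw [clt]; omega)]
      have hms : s < mid := by
        by_contra hc
        have : mid ^ r.toNat ≤ s ^ r.toNat := pow_le_pow_left₀ h0m (by omega) _
        omega
      exact ih _ (by omega) lo _ rfl h0 h1 (by omega)

theorem pvSearch_none (n r : Int) (hn : 0 ≤ n) (hr : 1 ≤ r)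
    (hnone : ∀ t : Int, 0 ≤ t → t ^ r.toNat ≠ n) :
    ∀ (lo hi : Int), 0 ≤ lo → pvSearch n r lo hi = (false, none) := by
  have hk : r.toNat ≠ 0 := by omega
  suffices H : ∀ (m : Nat) (lo hi : Int), (hi + 1 - lo).toNat = m → 0 ≤ lo →
      pvSearch n r lo hi = (false, none) by
    intro lo hi; exact H _ lo hi rfl
  intro m
  induction m using Nat.strong_induction_on with
  | _ m ih =>
    intro lo hi hm h0
    rw [pvSearch.eq_def]
    by_cases hlh : lo ≤ hi
    · simp only [dif_pos hlh]
      have hfd : PySem.Int.floordiv (hi - lo) 2 = (hi - lo) / 2 :=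
        PySem.Int.floordiv_eq_ediv_of_pos (by omega)
      set mid := lo + PySem.Int.floordiv (hi - lo) 2 with hmiddef
      have hmb : lo ≤ mid ∧ mid ≤ hi := by rw [hmiddef, hfd]; omega
      have h0m : 0 ≤ mid := by omega
      obtain ⟨ceq, clt⟩ := pvPowCap_cmp n mid hn h0m r.toNat hk
      rw [if_neg (by rw [ceq]; exact hnone mid h0m)]
      by_cases hlt : pvPowCap n mid r.toNat 1 < n
      · rw [if_pos hlt]
        exact ih _ (by omega) _ hi rfl (by omega)
      · rw [if_neg hlt]
        exact ih _ (by omega) lo _ rfl h0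
    · simp only [dif_neg hlh]

-- A on negative n with the parity guard passed (odd r) still returns (false, none)
theorem pvSearch_neg (n r : Int) (hn : n < 0) (hr : 1 ≤ r) :
    pvSearch n r 0 1 = (false, none) := by
  obtain ⟨j, hj⟩ : ∃ j, r.toNat = j + 1 := ⟨r.toNat - 1, by omega⟩
  rw [pvSearch.eq_def]
  have hfd : PySem.Int.floordiv ((1:Int) - 0) 2 = 0 := by decide
  simp only [dif_pos (by omega : (0:Int) ≤ 1), hfd, add_zero, hj]
  have hcap : pvPowCap n 0 (j+1) 1 = 0 := by
    simp only [pvPowCap, mul_zero]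
    rw [if_pos (by omega)]
  rw [hcap, if_neg (by omega), if_neg (by omega)]
  rw [pvSearch.eq_def]
  simp only [dif_neg (by omega : ¬ (0:Int) ≤ 0 - 1)]

-- ---- characterisation of A ----
theorem perfect_root_found (n r : Int) (hn : 0 ≤ n) (hr : 1 ≤ r) (s : Int) (hs : 0 ≤ s)
    (hsr : s ^ r.toNat = n) : perfect_root n r = (true, some s) := by
  have hk : r.toNat ≠ 0 := by omega
  have hguard : ¬ (r ≤ 0 ∨ (n < 0 ∧ PySem.Int.mod r 2 = 0)) := by
    rintro (h | ⟨h2, -⟩) <;> omega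
  rw [perfect_root, if_neg hguard]
  have hshi : s ≤ (if n > 1 then n else 1) := by
    split
    · rcases eq_or_lt_of_le hs with h0 | h1
      · rw [← h0, zero_pow hk] at hsr; omega
      · calc s ≤ s ^ r.toNat := le_self_pow₀ (by omega) hk
          _ = n := hsr
    · by_contra hc
      have h2s : (2:Int) ≤ s := by omega
      have := le_self_pow₀ (show (1:Int) ≤ s by omega) hk
      omega
  exact pvSearch_found n r hn hr s hs hsr 0 _ le_rfl hs hshi

theorem perfect_root_none (n r : Int) (hn : 0 ≤ n) (hr : 1 ≤ r)
    (hnone : ∀ t : Int, 0 ≤ t → t ^ r.toNat ≠ n) : perfect_root n r = (false, none) := by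
  have hguard : ¬ (r ≤ 0 ∨ (n < 0 ∧ PySem.Int.mod r 2 = 0)) := by
    rintro (h | ⟨h2, -⟩) <;> omega
  rw [perfect_root, if_neg hguard]
  exact pvSearch_none n r hn hr hnone 0 _ le_rfl

-- ---- B's Newton iteration ----
-- AM-GM-type polynomial inequality: (k+1)·a^k·b − k·a^(k+1) ≤ b^(k+1) for a,b ≥ 0
theorem pvKeyIneq (a b : Int) (ha : 0 ≤ a) (hb : 0 ≤ b) :
    ∀ k : Nat, (k + 1 : Int) * a ^ k * b - (k : Int) * a ^ (k+1) ≤ b ^ (k+1) := by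
  intro k
  induction k with
  | zero => simp
  | succ k ih =>
    have hmul := mul_le_mul_of_nonneg_right ih hb
    have hsq : 0 ≤ ((k:Int) + 1) * a ^ k * (b - a) ^ 2 :=
      mul_nonneg (mul_nonneg (by positivity) (pow_nonneg ha k)) (sq_nonneg _)
    push_cast
    simp only [pow_succ] at *
    nlinarith [hmul, hsq, pow_nonneg ha k, pow_nonneg hb k]

-- one Newton step never drops below any candidate root
theorem pvNewton_step_ge (n r x s : Int) (hr : 1 ≤ r) (hx : 1 ≤ x) (hs : 0 ≤ s)
    (hsn : s ^ r.toNat ≤ n) :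
    s ≤ PySem.Int.floordiv ((r - 1) * x + PySem.Int.floordiv n (x ^ (r - 1).toNat)) r := by
  have hd : (0:Int) < x ^ (r - 1).toNat := pow_pos (by omega) _
  rw [PySem.Int.le_floordiv_iff_mul_le (by omega : (0:Int) < r)]
  have hstep : (s * r - (r - 1) * x) ≤ PySem.Int.floordiv n (x ^ (r - 1).toNat) →
      s * r ≤ (r - 1) * x + PySem.Int.floordiv n (x ^ (r - 1).toNat) := by omega
  apply hstep
  rw [PySem.Int.le_floordiv_iff_mul_le hd]
  have key := pvKeyIneq x s (by omega) hs (r-1).toNat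
  have hc : (((r-1).toNat : Nat) : Int) = r - 1 := by omega
  have hk1 : (r-1).toNat + 1 = r.toNat := by omega
  rw [hk1, hc] at key
  have hxr : x ^ r.toNat = x ^ (r-1).toNat * x := by rw [← hk1, pow_succ]
  rw [hxr] at key
  nlinarith [key, hsn]

-- one Newton step strictly decreases while x is above the root
theorem pvNewton_step_lt (n r x : Int) (hr : 1 ≤ r) (hx : 1 ≤ x) (hxn : n < x ^ r.toNat) :
    PySem.Int.floordiv ((r - 1) * x + PySem.Int.floordiv n (x ^ (r - 1).toNat)) r < x := by
  have hd : (0:Int) < x ^ (r - 1).toNat := pow_pos (by omega) _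
  have hk1 : (r-1).toNat + 1 = r.toNat := by omega
  have h1 : PySem.Int.floordiv n (x ^ (r - 1).toNat) < x := by
    rw [PySem.Int.floordiv_lt_iff_lt_mul hd]
    calc n < x ^ r.toNat := hxn
      _ = x * x ^ (r-1).toNat := by rw [← hk1, pow_succ]; ring
  rw [PySem.Int.floordiv_lt_iff_lt_mul (by omega : (0:Int) < r)]
  nlinarith [h1]

-- started at an upper bound, the Newton loop returns the floor of the r-th root
theorem pvNewton_correct (n r : Int) (hr : 1 ≤ r) (hn : 1 ≤ n) :
    ∀ (x : Int), 1 ≤ x → (∀ s : Int, 0 ≤ s → s ^ r.toNat ≤ n → s ≤ x) →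
      pvNewton n r x ^ r.toNat ≤ n ∧
      (∀ s : Int, 0 ≤ s → s ^ r.toNat ≤ n → s ≤ pvNewton n r x) := by
  suffices H : ∀ (m : Nat) (x : Int), x.toNat = m → 1 ≤ x →
      (∀ s : Int, 0 ≤ s → s ^ r.toNat ≤ n → s ≤ x) →
      pvNewton n r x ^ r.toNat ≤ n ∧
      (∀ s : Int, 0 ≤ s → s ^ r.toNat ≤ n → s ≤ pvNewton n r x) by
    intro x; exact H _ x rfl
  intro m
  induction m using Nat.strong_induction_on with
  | _ m ih =>
    intro x hm hx hinv
    rw [pvNewton.eq_def, if_neg (by omega : ¬ x ≤ 0)]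
    set y := PySem.Int.floordiv ((r - 1) * x + PySem.Int.floordiv n (x ^ (r - 1).toNat)) r with hy
    by_cases hxy : y ≥ x
    · rw [if_pos hxy]
      refine ⟨?_, hinv⟩
      by_contra hc
      exact absurd (pvNewton_step_lt n r x hr hx (by omega)) (by omega)
    · rw [if_neg hxy]
      have hy1 : 1 ≤ y := by
        have := pvNewton_step_ge n r x 1 hr hx (by omega) (by simpa using hn)
        omega
      have hinv' : ∀ s : Int, 0 ≤ s → s ^ r.toNat ≤ n → s ≤ y := fun s hs hsn =>
        pvNewton_step_ge n r x s hr hx hs hsn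
      exact ih y.toNat (by omega) y rfl hy1 hinv'

-- ===== VERDICT (by name: the statement is the Claim_ definition above) =====
theorem perfect_root_spec : Claim_equal_perfect_root := by
  intro n r _
  show perfect_root n r = perfect_root_alt n r
  by_cases hr : r ≤ 0
  · simp [perfect_root, perfect_root_alt, hr]
  · have hr1 : 1 ≤ r := by omega
    have hk : r.toNat ≠ 0 := by omega
    by_cases hn : n < 0
    · by_cases hpar : PySem.Int.mod r 2 = 0
      · have hpar' : r % 2 = 0 := by
          rw [← PySem.Int.mod_eq_emod_of_pos (by norm_num : (0:Int) < 2)]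
          exact hpar
        simp [perfect_root, perfect_root_alt, hn]
        intro _ h
        omega
      · have hguard : ¬ (r ≤ 0 ∨ (n < 0 ∧ PySem.Int.mod r 2 = 0)) := by
          rintro (h | ⟨-, h2⟩)
          · omega
          · exact hpar h2
        rw [perfect_root, if_neg hguard, if_neg (by omega : ¬ n > 1),
          pvSearch_neg n r hn hr1]
        simp [perfect_root_alt, hn]
    · have hn0 : 0 ≤ n := by omega
      have hg1 : ¬ (r ≤ 0 ∨ n < 0) := by omega
      by_cases hn1 : n ≤ 1
      · have hsr : n ^ r.toNat = n := by
          rcases (by omega : n = 0 ∨ n = 1) with h | h <;> subst h <;>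
            simp [zero_pow hk]
        rw [perfect_root_found n r hn0 hr1 n hn0 hsr]
        simp [perfect_root_alt, hg1, hn1]
      · have hn2 : 2 ≤ n := by omega
        have hnb : n < (2:Int) ^ PySem.Int.bitLength n := by
          have h := PySem.Int.lt_two_pow_bitLength n
          have habs : (n.natAbs : Int) = n := Int.natAbs_of_nonneg hn0
          calc n = (n.natAbs : Int) := habs.symm
            _ < (((2:Nat) ^ PySem.Int.bitLength n : Nat) : Int) := by exact_mod_cast h
            _ = (2:Int) ^ PySem.Int.bitLength n := by push_cast; ring
        simp only [perfect_root_alt]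
        rw [if_neg hg1, if_neg hn1]
        by_cases hrb : ((PySem.Int.bitLength n : Int)) ≤ r
        · rw [if_pos hrb]
          apply perfect_root_none n r hn0 hr1
          intro t ht heq
          by_cases ht2 : t ≤ 1
          · have : t ^ r.toNat ≤ 1 := pow_le_one₀ ht (by omega)
            omega
          · have h2t : (2:Int) ≤ t := by omega
            have h1 : (2:Int) ^ PySem.Int.bitLength n ≤ 2 ^ r.toNat :=
              pow_le_pow_right₀ (by norm_num) (by omega)
            have h2 : (2:Int) ^ r.toNat ≤ t ^ r.toNat :=
              pow_le_pow_left₀ (by norm_num) h2t _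
            omega
        · rw [if_neg hrb]
          set b : Int := (PySem.Int.bitLength n : Int) with hbdef
          set e := PySem.Int.floordiv (b + r - 1) r with hedef
          set x0 := (2:Int) ^ e.toNat with hx0def
          set z := pvNewton n r x0 with hzdef
          have hb2 : 2 ≤ b := by
            by_contra hc
            have hble : PySem.Int.bitLength n ≤ 1 := by omega
            have : (2:Int) ^ PySem.Int.bitLength n ≤ 2 ^ 1 :=
              pow_le_pow_right₀ (by norm_num) hble
            have h21 : (2:Int) ^ 1 = 2 := by norm_num
            linarith [hnb]
          have he1 : e * r ≤ b + r - 1 :=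
            (PySem.Int.le_floordiv_iff_mul_le (by omega : (0:Int) < r)).mp le_rfl
          have he2 : b + r - 1 < (e + 1) * r :=
            (PySem.Int.floordiv_lt_iff_lt_mul (by omega : (0:Int) < r)).mp (lt_add_one e)
          have hbe : b ≤ e * r := by nlinarith [he2]
          have he0 : 1 ≤ e := by
            by_contra hc
            have h1 : e ≤ 0 := by omega
            have : e * r ≤ 0 := mul_nonpos_of_nonpos_of_nonneg h1 (by omega)
            omega
          have hx0 : 1 ≤ x0 := one_le_pow₀ (by norm_num)
          have hbek : PySem.Int.bitLength n ≤ e.toNat * r.toNat := by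
            have hcast : ((e.toNat * r.toNat : Nat) : Int) = e * r := by
              push_cast
              rw [Int.toNat_of_nonneg (by omega), Int.toNat_of_nonneg (by omega)]
            have h := hbe
            rw [← hcast, hbdef] at h
            exact_mod_cast h
          have hnx0 : n < x0 ^ r.toNat := by
            calc n < (2:Int) ^ PySem.Int.bitLength n := hnb
              _ ≤ (2:Int) ^ (e.toNat * r.toNat) := pow_le_pow_right₀ (by norm_num) hbek
              _ = x0 ^ r.toNat := by rw [hx0def, ← pow_mul]
          have hinv : ∀ s : Int, 0 ≤ s → s ^ r.toNat ≤ n → s ≤ x0 := by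
            intro s hs hsn
            by_contra hc
            have : x0 ^ r.toNat ≤ s ^ r.toNat := pow_le_pow_left₀ (by omega) (by omega) _
            omega
          obtain ⟨hz1, hz2⟩ := pvNewton_correct n r hr1 (by omega) x0 hx0 hinv
          rw [← hzdef] at hz1 hz2
          have hz0 : 1 ≤ z := hz2 1 (by omega) (by simpa using (show (1:Int) ≤ n by omega))
          by_cases hzk : z ^ r.toNat = n
          · rw [if_pos hzk]
            exact perfect_root_found n r hn0 hr1 z (by omega) hzk
          · rw [if_neg hzk]
            apply perfect_root_none n r hn0 hr1
            intro t ht heq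
            have htz : t ≤ z := hz2 t ht (by omega)
            have hzt : z ≤ t := by
              by_contra hc
              have : t ^ r.toNat < z ^ r.toNat := pow_lt_pow_left₀ (by omega) ht hk
              omega
            have : t = z := by omega
            exact hzk (by rw [← this]; exact heq)
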